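-- pv_equiv track=rewrite | github.com/scadding/MyUniverse_V2 | src/Generators/tablegen/dice.py | highest_n
-- ===== SOURCE A (Python) =====
-- def highest_n(l, n):
--     x = []
--     x.extend(l)
--     x.sort(reverse=True)
--     a = x[:n]
--     res = []
--     for i in a:
--         res.append(l.index(i))
--     res.sort()
--     r = list()
--     for i in res:
--         r.append(l[i])
--     return r
-- ===== SOURCE B (Python) =====
-- def highest_n(l, n):
--     top = sorted(l, reverse=True)[:n]
--     cnt = {}
--     for v in top:
--         cnt[v] = cnt.get(v, 0) + 1
--     out = []
--     for v in l:
--         c = cnt.pop(v, 0)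
--         if c:
--             out.extend([v] * c)
--     return out
-- ===== Notes on version B (the rewrite author's own statement) =====
-- stated objective: alternative
-- what changed: B replaces A's per-top-element l.index scans plus a second sort of the recovered index list by one counting dict over the top-n slice and a single in-order pass over l that emits each qualifying value's copies at its first occurrence.
import Mathlib
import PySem

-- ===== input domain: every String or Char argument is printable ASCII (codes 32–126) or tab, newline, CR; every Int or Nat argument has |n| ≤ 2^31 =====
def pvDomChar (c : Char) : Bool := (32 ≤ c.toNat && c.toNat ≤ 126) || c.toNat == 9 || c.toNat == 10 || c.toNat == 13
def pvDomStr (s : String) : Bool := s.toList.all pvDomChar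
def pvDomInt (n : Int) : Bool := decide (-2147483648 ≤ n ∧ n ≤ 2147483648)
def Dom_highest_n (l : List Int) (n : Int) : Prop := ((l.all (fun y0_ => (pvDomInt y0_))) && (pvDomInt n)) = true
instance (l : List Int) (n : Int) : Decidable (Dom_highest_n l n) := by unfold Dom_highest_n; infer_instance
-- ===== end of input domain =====

-- B replaces A's per-element l.index scans by one counting dict and a single in-order pass (return value only; no argument is mutated by either version).

-- ===== PORT A =====
-- x = list(l); x.sort(reverse=True); a = x[:n]; res = [l.index(i) for i in a]; res.sort(); r = [l[i] for i in res]
-- (l.index(i) always succeeds and every index in res is in range, so the .getD defaults below are unreachable)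
def highest_n (l : List Int) (n : Int) : List Int :=
  ((PySem.List.sorted
      ((PySem.List.slice (PySem.List.sorted l (fun v => v) true) none (some n)).foldl
        (fun acc i => acc ++ [((PySem.List.index? l i).getD 0 : Int)]) [])
      (fun v => v) false).foldl
    (fun r i => r ++ [PySem.List.pyGetD l i 0]) [])

-- ===== PORT B =====
-- loop body of B's single pass: c = cnt.pop(v, 0); if c: out.extend([v]*c)
def pvStepB (s : List Int × PySem.Dict Int Int) (v : Int) : List Int × PySem.Dict Int Int :=
  let c := s.2.getD v 0
  let d := s.2.erase v
  if c ≠ 0 then (s.1 ++ PySem.List.pyRepeat [v] c, d) else (s.1, d)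

-- top = sorted(l, reverse=True)[:n]; cnt[v] = cnt.get(v,0)+1 for v in top; then the pvStepB pass over l
def highest_n_alt (l : List Int) (n : Int) : List Int :=
  (l.foldl pvStepB
    ([],
     (PySem.List.slice (PySem.List.sorted l (fun v => v) true) none (some n)).foldl
       (fun d v => d.insert v (d.getD v 0 + 1)) PySem.Dict.empty)).1

-- ===== PRECONDITION & SPEC =====
def Spec_highest_n (l : List Int) (n : Int) (out : List Int) : Prop := out = highest_n_alt l n
instance (l : List Int) (n : Int) (out : List Int) : Decidable (Spec_highest_n l n out) := by unfold Spec_highest_n; infer_instance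

-- ===== CLAIM (what is proved, stated in full; the proofs are below) =====
def Claim_equal_highest_n : Prop := ∀ (l : List Int) (n : Int), Dom_highest_n l n → Spec_highest_n l n (highest_n l n)

-- ===== LEMMAS AND PROOFS =====

-- first index of v in l, as A's `l.index` computes it (default unreachable when v ∈ l)
def pvIdx (l : List Int) (v : Int) : Nat := (PySem.List.index? l v).getD 0

-- the distinct values of `ls` not in `seen`, in order of first occurrence
def pvFirsts (seen : List Int) : List Int → List Int
  | [] => []
  | v :: t => if v ∈ seen then pvFirsts seen t else v :: pvFirsts (v :: seen) t

lemma pvIndex?_eq {l : List Int} {v : Int} (h : v ∈ l) :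
    PySem.List.index? l v = some (pvIdx l v) := by
  obtain ⟨k, hk⟩ := Option.isSome_iff_exists.mp ((PySem.List.index?_isSome_iff l v).2 h)
  unfold pvIdx
  rw [hk]
  rfl

lemma pvIdx_cons_self (v : Int) (t : List Int) : pvIdx (v :: t) v = 0 := by
  unfold pvIdx
  rw [PySem.List.index?_cons_self]
  rfl

lemma pvIdx_cons_ne {b v : Int} {t : List Int} (hbv : b ≠ v) (hm : v ∈ t) :
    pvIdx (b :: t) v = pvIdx t v + 1 := by
  unfold pvIdx
  rw [PySem.List.index?_cons_of_ne t hbv, pvIndex?_eq hm]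
  rfl

lemma pvGetBack {l : List Int} {v : Int} (h : v ∈ l) :
    PySem.List.pyGetD l (pvIdx l v : Int) 0 = v := by
  rw [PySem.List.pyGetD_natCast]
  obtain ⟨hk, hget, -⟩ := PySem.List.getElem_of_index?_eq_some (pvIndex?_eq h)
  simp [List.getD, List.getElem?_eq_getElem hk, hget]

lemma pvFirsts_mem (ls : List Int) : ∀ (seen : List Int) (v : Int),
    v ∈ pvFirsts seen ls ↔ v ∈ ls ∧ v ∉ seen := by
  induction ls with
  | nil => intro seen v; simp [pvFirsts]
  | cons u t ih =>
    intro seen v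
    by_cases hu : u ∈ seen
    · rw [pvFirsts, if_pos hu, ih]
      constructor
      · rintro ⟨h1, h2⟩; exact ⟨List.mem_cons_of_mem _ h1, h2⟩
      · rintro ⟨h1, h2⟩
        rcases List.mem_cons.1 h1 with rfl | h1
        · exact absurd hu h2
        · exact ⟨h1, h2⟩
    · rw [pvFirsts, if_neg hu]
      simp only [List.mem_cons, ih, List.mem_cons]
      by_cases hvu : v = u <;> simp [hvu, hu]

lemma pvFirsts_pairwise (ls : List Int) : ∀ (seen : List Int),
    (pvFirsts seen ls).Pairwise (fun u w => pvIdx ls u < pvIdx ls w) := by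
  induction ls with
  | nil => intro seen; simp [pvFirsts]
  | cons b t ih =>
    intro seen
    by_cases hb : b ∈ seen
    · rw [pvFirsts, if_pos hb]
      refine List.Pairwise.imp_of_mem ?_ (ih seen)
      intro u w hu hw hlt
      have hu' := (pvFirsts_mem t seen u).1 hu
      have hw' := (pvFirsts_mem t seen w).1 hw
      have hub : b ≠ u := fun e => hu'.2 (e ▸ hb)
      have hwb : b ≠ w := fun e => hw'.2 (e ▸ hb)
      rw [pvIdx_cons_ne hub hu'.1, pvIdx_cons_ne hwb hw'.1]
      omega
    · rw [pvFirsts, if_neg hb]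
      refine List.Pairwise.cons ?_ ?_
      · intro w hw
        have hw' := (pvFirsts_mem t (b :: seen) w).1 hw
        have hwb : b ≠ w := fun e => hw'.2 (e ▸ List.mem_cons_self)
        rw [pvIdx_cons_self, pvIdx_cons_ne hwb hw'.1]
        omega
      · refine List.Pairwise.imp_of_mem ?_ (ih (b :: seen))
        intro u w hu hw hlt
        have hu' := (pvFirsts_mem t (b :: seen) u).1 hu
        have hw' := (pvFirsts_mem t (b :: seen) w).1 hw
        have hub : b ≠ u := fun e => hu'.2 (e ▸ List.mem_cons_self)
        have hwb : b ≠ w := fun e => hw'.2 (e ▸ List.mem_cons_self)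
        rw [pvIdx_cons_ne hub hu'.1, pvIdx_cons_ne hwb hw'.1]
        omega

lemma pvFirsts_nodup (l : List Int) : (pvFirsts [] l).Nodup := by
  refine List.Pairwise.imp ?_ (pvFirsts_pairwise l [])
  intro a b h e
  exact absurd h (e ▸ lt_irrefl _)

lemma pvFlatMap_congr {f g : Int → List Int} : ∀ {F : List Int},
    (∀ v ∈ F, f v = g v) → F.flatMap f = F.flatMap g := by
  intro F h
  induction F with
  | nil => rfl
  | cons v t ih =>
    rw [List.flatMap_cons, List.flatMap_cons, h v List.mem_cons_self,
        ih (fun w hw => h w (List.mem_cons_of_mem _ hw))]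

lemma pvGroup_perm : ∀ (F xs : List Int), F.Nodup → (∀ v ∈ xs, v ∈ F) →
    (F.flatMap (fun v => List.replicate (xs.count v) v)).Perm xs := by
  intro F
  induction F with
  | nil =>
    intro xs _ h
    have hxs : xs = [] := by
      cases xs with
      | nil => rfl
      | cons y t => exact absurd (h y List.mem_cons_self) (List.not_mem_nil)
    simp [hxs]
  | cons v F' ih =>
    intro xs hnd hsub
    have hv' : v ∉ F' := (List.nodup_cons.1 hnd).1
    have hnd' : F'.Nodup := (List.nodup_cons.1 hnd).2
    rw [List.flatMap_cons]
    have hcongr : F'.flatMap (fun w => List.replicate (xs.count w) w)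
        = F'.flatMap (fun w => List.replicate ((xs.filter (fun x => !(x == v))).count w) w) := by
      refine pvFlatMap_congr (fun w hw => ?_)
      have hwv : w ≠ v := fun e => hv' (e ▸ hw)
      rw [List.count_filter (by simp [hwv])]
    have hsub' : ∀ x ∈ xs.filter (fun x => !(x == v)), x ∈ F' := by
      intro x hx
      have hxv : x ≠ v := by
        have := List.of_mem_filter hx
        simpa using this
      rcases List.mem_cons.1 (hsub x (List.mem_of_mem_filter hx)) with rfl | h
      · exact absurd rfl hxv
      · exact h
    have hperm' := ih (xs.filter (fun x => !(x == v))) hnd' hsub'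
    rw [← List.filter_beq (l := xs) v, hcongr]
    exact (List.Perm.append_left _ hperm').trans (List.filter_append_perm (fun x => x == v) xs)

lemma pvBlocks_pairwise (g : Int → Int) (k : Int → Nat) : ∀ (F : List Int),
    F.Pairwise (fun u w => g u < g w) →
    (F.flatMap (fun v => List.replicate (k v) (g v))).Pairwise (fun a b => a ≤ b) := by
  intro F
  induction F with
  | nil => intro _; simp
  | cons v F' ih =>
    intro hp
    have hhead := (List.pairwise_cons.1 hp).1
    have htail := (List.pairwise_cons.1 hp).2
    rw [List.flatMap_cons, List.pairwise_append]
    refine ⟨List.pairwise_replicate.2 (Or.inr le_rfl), ih htail, ?_⟩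
    intro x hx y hy
    obtain ⟨w, hwF, hy'⟩ := List.mem_flatMap.1 hy
    rw [List.eq_of_mem_replicate hx, List.eq_of_mem_replicate hy']
    exact le_of_lt (hhead w hwF)

lemma pvFind?_filter (items : List (Int × Int)) (k j : Int) (hjk : j ≠ k) :
    List.find? (fun q => q.1 == j) (items.filter (fun q => !(q.1 == k)))
      = List.find? (fun q => q.1 == j) items := by
  induction items with
  | nil => rfl
  | cons p t ih =>
    by_cases hpk : p.1 = k
    · have hpj : (p.1 == j) = false := by
        simp [hpk]
        exact fun e => hjk e.symm
      rw [List.filter_cons_of_neg (by simp [hpk]), ih]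
      simp [List.find?, hpj]
    · rw [List.filter_cons_of_pos (by simp [hpk])]
      by_cases hpj : (p.1 == j) = true
      · simp [List.find?, hpj]
      · have hpj' : (p.1 == j) = false := by simpa using hpj
        simp [List.find?, hpj', ih]

lemma pvGetD_erase (d : PySem.Dict Int Int) (k j : Int) :
    (d.erase k).getD j 0 = if j = k then 0 else d.getD j 0 := by
  by_cases hjk : j = k
  · subst hjk
    have : List.find? (fun q => q.1 == j) (d.items.filter (fun q => !(q.1 == j))) = none := by
      rw [List.find?_eq_none]
      intro x hx
      have := List.of_mem_filter hx
      simpa using this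
    simp [PySem.Dict.getD, PySem.Dict.get?, PySem.Dict.erase, this]
  · simp [PySem.Dict.getD, PySem.Dict.get?, PySem.Dict.erase, pvFind?_filter d.items k j hjk, hjk]

lemma pvB_loop (xs : List Int) : ∀ (ls acc : List Int) (d : PySem.Dict Int Int) (seen : List Int),
    (∀ w, d.getD w 0 = if w ∈ seen then 0 else (xs.count w : Int)) →
    (ls.foldl pvStepB (acc, d)).1
      = acc ++ (pvFirsts seen ls).flatMap (fun v => List.replicate (xs.count v) v) := by
  intro ls
  induction ls with
  | nil => intro acc d seen _; simp [pvFirsts]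
  | cons v t ih =>
    intro acc d seen h
    rw [List.foldl_cons]
    by_cases hv : v ∈ seen
    · have hc0 : d.getD v 0 = 0 := by rw [h v, if_pos hv]
      have hstep : pvStepB (acc, d) v = (acc, d.erase v) := by
        simp [pvStepB, hc0]
      rw [hstep, pvFirsts, if_pos hv]
      refine ih acc (d.erase v) seen (fun w => ?_)
      rw [pvGetD_erase]
      by_cases hw : w = v
      · subst hw; rw [if_pos rfl, if_pos hv]
      · rw [if_neg hw, h w]
    · have hcv : d.getD v 0 = (xs.count v : Int) := by rw [h v, if_neg hv]
      have hinv : ∀ w, (d.erase v).getD w 0 = if w ∈ v :: seen then 0 else (xs.count w : Int) := by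
        intro w
        rw [pvGetD_erase]
        by_cases hw : w = v
        · subst hw; simp
        · rw [if_neg hw, h w]
          simp [List.mem_cons, hw]
      rw [pvFirsts, if_neg hv, List.flatMap_cons, ← List.append_assoc]
      by_cases hz : (xs.count v : Int) ≠ 0
      · have hstep : pvStepB (acc, d) v
            = (acc ++ List.replicate (xs.count v) v, d.erase v) := by
          simp only [pvStepB, hcv]
          rw [if_pos hz, PySem.List.pyRepeat_singleton]
          simp
        rw [hstep]
        exact ih _ _ _ hinv
      · have hz' : xs.count v = 0 := by omega
        have hstep : pvStepB (acc, d) v = (acc, d.erase v) := by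
          simp only [pvStepB, hcv]
          rw [if_neg hz]
        rw [hstep, hz']
        simpa using ih _ _ _ hinv

lemma pvMain (l : List Int) (n : Int) : highest_n l n = highest_n_alt l n := by
  set a := PySem.List.slice (PySem.List.sorted l (fun v => v) true) none (some n) with ha_def
  have ha : ∀ v ∈ a, v ∈ l := by
    intro v hv
    exact ((PySem.List.sorted_perm l (fun v => v) true).mem_iff).1
      (PySem.List.mem_of_mem_slice _ _ _ hv)
  have hFl : ∀ v ∈ pvFirsts [] l, v ∈ l := by
    intro v hv; exact ((pvFirsts_mem l [] v).1 hv).1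
  -- B computes the grouped pass
  have hB : highest_n_alt l n
      = (pvFirsts [] l).flatMap (fun v => List.replicate (a.count v) v) := by
    unfold highest_n_alt
    rw [← ha_def]
    refine pvB_loop a l [] _ [] (fun w => ?_)
    rw [PySem.Dict.getD_foldl_insert_add_one]
    simp
  -- A: turn the two append loops into maps
  have hA : highest_n l n
      = (PySem.List.sorted (a.map (fun v => (pvIdx l v : Int))) (fun v => v) false).map
          (fun i => PySem.List.pyGetD l i 0) := by
    unfold highest_n
    rw [← ha_def,
        PySem.List.foldl_append_singleton_eq_map (fun i => ((PySem.List.index? l i).getD 0 : Int)),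
        PySem.List.foldl_append_singleton_eq_map (fun i => PySem.List.pyGetD l i 0)]
    simp [pvIdx]
  -- the sorted index list is the grouped first-occurrence list of indices
  have hsorted : PySem.List.sorted (a.map (fun v => (pvIdx l v : Int))) (fun v => v) false
      = (pvFirsts [] l).flatMap (fun v => List.replicate (a.count v) ((pvIdx l v : Int))) := by
    have hsub : ∀ v ∈ a, v ∈ pvFirsts [] l := by
      intro v hv; exact (pvFirsts_mem l [] v).2 ⟨ha v hv, by simp⟩
    have hgp := pvGroup_perm (pvFirsts [] l) a (pvFirsts_nodup l) hsub
    have hpermT : ((pvFirsts [] l).flatMap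
        (fun v => List.replicate (a.count v) ((pvIdx l v : Int)))).Perm
        (a.map (fun v => (pvIdx l v : Int))) := by
      have := hgp.map (fun v => (pvIdx l v : Int))
      simpa [List.map_flatMap, List.map_replicate] using this
    refine PySem.List.eq_of_perm_of_pairwise_le_of_injective (fun x => x)
      (fun _ _ h => h) ((PySem.List.sorted_perm _ _ _).trans hpermT.symm)
      ?_ ?_
    · exact PySem.List.sorted_pairwise _ _
    · refine pvBlocks_pairwise (fun v => (pvIdx l v : Int)) (fun v => a.count v) _ ?_
      refine List.Pairwise.imp ?_ (pvFirsts_pairwise l [])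
      intro u w h
      show (pvIdx l u : Int) < (pvIdx l w : Int)
      exact_mod_cast h
  rw [hA, hsorted, hB, List.map_flatMap]
  refine pvFlatMap_congr (fun v hv => ?_)
  rw [List.map_replicate, pvGetBack (hFl v hv)]

-- ===== VERDICT (by name: the statement is the Claim_ definition above) =====
theorem highest_n_spec : Claim_equal_highest_n := by
  intro l n _
  unfold Spec_highest_n
  exact pvMain l n
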